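-- pv_equiv track=rewrite | github.com/cbboyan/solverpy | scripts/git-user-hooks/gittools.py | gittags
-- ===== SOURCE A (Python) =====
-- def gittags(commits):
--    cur = [0, 0, 0]  # [MAJOR, MINOR, PATCH]
--    tags = []
--    for (hsh, ver, typ, msg) in commits:
--       if ver:
--          cur = ver
--          continue # this commit already has a version tag
--       if typ: # but not ver
--          if typ.endswith("!!!"):
--             cur = [cur[0]+1, 0, 0] # increase MAJOR
--          elif typ.endswith("!!"):
--             cur = [cur[0], cur[1]+1, 0] # increase MINOR
--          elif typ.endswith("!"):
--             cur = [cur[0], cur[1], cur[2]+1] # increase PATCH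
--          else:
--             continue # this commit needs no version tag
--          tags.append((hsh, cur))
--    return tags
-- ===== SOURCE B (Python) =====
-- def _comp(base, hist, c):
--     # value of version component c after the bumps in `hist` hit `base`:
--     # every bump of a level below c resets it to 0, every level-c bump adds 1,
--     # so it is the number of level-c bumps since the last reset
--     # (counted on top of base[c] when no reset ever happened)
--     resets = [j for j, l in enumerate(hist) if l < c]
--     start = resets[-1] + 1 if resets else 0
--     cnt = hist[start:].count(c)
--     return cnt if resets else base[c] + cnt
--
--
-- def gittags(commits):
--     # stage 1: split the history into segments, each a base version plus its
--     # bump events (hash, level) with level 0=MAJOR, 1=MINOR, 2=PATCH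
--     segs = []
--     base, bumps = [0, 0, 0], []
--     for hsh, ver, typ, msg in commits:
--         if ver:
--             segs.append((base, bumps))
--             base, bumps = ver, []
--         elif typ and typ.endswith('!'):
--             n = len(typ) - len(typ.rstrip('!'))
--             bumps = bumps + [(hsh, 3 - min(3, n))]
--     segs.append((base, bumps))
--     # stage 2: each tag's version is computed independently by counting
--     tags = []
--     for base, bumps in segs:
--         levels = [lv for _, lv in bumps]
--         for i, (hsh, _) in enumerate(bumps):
--             tags.append((hsh, [_comp(base, levels[:i + 1], c) for c in range(3)]))
--     return tags
-- ===== Notes on version B (the rewrite author's own statement) =====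
-- stated objective: alternative
-- what changed: A's single pass that threads a mutable current version through an endswith('!!!')/('!!')/('!') cascade is replaced by a staged pipeline: first split the history into segments (base version plus a list of (hash, level) bump events), then compute every tag's version independently by a closed-form count (component c = number of level-c bumps since the last bump of a lower level, on top of base[c] if it was never reset).
import Mathlib
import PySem

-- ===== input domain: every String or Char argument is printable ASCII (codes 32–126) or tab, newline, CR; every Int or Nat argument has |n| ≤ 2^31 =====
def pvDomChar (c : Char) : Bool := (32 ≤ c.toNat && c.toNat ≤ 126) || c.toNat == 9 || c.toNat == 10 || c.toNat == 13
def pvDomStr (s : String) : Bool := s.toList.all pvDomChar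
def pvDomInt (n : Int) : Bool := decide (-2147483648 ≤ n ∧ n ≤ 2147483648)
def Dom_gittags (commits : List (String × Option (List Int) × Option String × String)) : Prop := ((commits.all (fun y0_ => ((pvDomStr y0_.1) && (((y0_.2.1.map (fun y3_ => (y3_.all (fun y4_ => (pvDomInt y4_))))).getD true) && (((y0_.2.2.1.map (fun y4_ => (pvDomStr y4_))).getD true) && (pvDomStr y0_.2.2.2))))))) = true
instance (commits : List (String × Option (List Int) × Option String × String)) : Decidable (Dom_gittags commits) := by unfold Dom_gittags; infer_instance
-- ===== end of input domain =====

-- B replaces A's single pass threading a current version through an endswith-cascade by a staged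
-- computation: first split the history into segments (base version + bump events), then compute
-- each tag's version independently by counting bumps since the last resetting bump.

-- ===== PORT A =====
-- Python truthiness of `ver` (None and [] are falsy)
def pvVerTruthy (v : Option (List Int)) : Bool :=
  match v with
  | some l => !l.isEmpty
  | none => false

-- the `if typ.endswith(...)` cascade of A; outer none = "continue" (no tag),
-- some none = IndexError reading cur (excluded by Pre_), some (some cur') = new version
def pvBumpA (cur : List Int) (t : String) : Option (Option (List Int)) :=
  if PySem.Str.endswith t "!!!" then
    some (match PySem.List.pyGet? cur 0 with
          | some a => some [a + 1, 0, 0]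
          | none => none)
  else if PySem.Str.endswith t "!!" then
    some (match PySem.List.pyGet? cur 0, PySem.List.pyGet? cur 1 with
          | some a, some b => some [a, b + 1, 0]
          | _, _ => none)
  else if PySem.Str.endswith t "!" then
    some (match PySem.List.pyGet? cur 0, PySem.List.pyGet? cur 1, PySem.List.pyGet? cur 2 with
          | some a, some b, some c => some [a, b, c + 1]
          | _, _, _ => none)
  else none

def gittagsGoA (cur : List Int) (tags : List (String × List Int)) :
    List (String × Option (List Int) × Option String × String) → List (String × List Int)
  | [] => tags
  | (hsh, ver, typ, _msg) :: rest =>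
    if pvVerTruthy ver then
      gittagsGoA (ver.getD cur) tags rest   -- here ver is `some v` with v ≠ [], so getD returns v
    else
      match typ with
      | none => gittagsGoA cur tags rest
      | some t =>
        if t = "" then gittagsGoA cur tags rest   -- `if typ:` — the empty string is falsy
        else
          match pvBumpA cur t with
          | none => gittagsGoA cur tags rest
          | some none => tags                     -- IndexError (outside Pre_)
          | some (some cur') => gittagsGoA cur' (tags ++ [(hsh, cur')]) rest

def gittags (commits : List (String × Option (List Int) × Option String × String)) : List (String × List Int) :=
  gittagsGoA [0, 0, 0] [] commits

-- ===== PORT B =====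
-- hand port of typ.rstrip('!') (exact: removes exactly the trailing run of '!')
def pvRstripBang (t : String) : List Char :=
  (t.toList.reverse.dropWhile (· == '!')).reverse

-- stage 1 of Source B: split the history into segments (base version, bump events (hash, level))
def pvSegsGo (base : List Int) (bumps : List (String × Int)) :
    List (String × Option (List Int) × Option String × String) →
    List (List Int × List (String × Int))
  | [] => [(base, bumps)]
  | (hsh, ver, typ, _msg) :: rest =>
    if pvVerTruthy ver then
      (base, bumps) :: pvSegsGo (ver.getD base) [] rest
    else
      match typ with
      | none => pvSegsGo base bumps rest
      | some t =>
        if t ≠ "" ∧ PySem.Str.endswith t "!" = true then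
          pvSegsGo base
            (bumps ++ [(hsh, 3 - min 3 ((t.toList.length : Int) - ((pvRstripBang t).length : Int)))])
            rest
        else pvSegsGo base bumps rest

-- _comp of Source B: component c after the bump levels `hist` hit `base`
def pvComp (base : List Int) (hist : List Int) (c : Int) : Int :=
  let resets := ((PySem.List.enumerate hist 0).filter (fun p => decide (p.2 < c))).map Prod.fst
  match resets.getLast? with
  | some j => ((PySem.List.slice hist (some (j + 1)) none).count c : Int)
  | none => PySem.List.pyGetD base c 0 + (hist.count c : Int)   -- base[c]; IndexError outside Pre_

-- stage 2 of Source B for one segment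
def pvSegTags (base : List Int) (bumps : List (String × Int)) : List (String × List Int) :=
  (PySem.List.enumerate bumps 0).map (fun p =>
    (p.2.1, (PySem.List.pyRange 0 3 1).map (fun c =>
      pvComp base (PySem.List.slice (bumps.map (·.2)) none (some (p.1 + 1))) c)))

def gittags_alt (commits : List (String × Option (List Int) × Option String × String)) : List (String × List Int) :=
  ((pvSegsGo [0, 0, 0] [] commits).map (fun s => pvSegTags s.1 s.2)).flatten

-- ===== PRECONDITION & SPEC =====
-- n = min(3, number of trailing '!') of a typ (0 for missing/empty typ)
def pvBangs (typ : Option String) : Nat :=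
  match typ with
  | some t => if t = "" then 0 else min 3 (t.toList.length - (pvRstripBang t).length)
  | none => 0

-- Pre_ excludes exactly the inputs on which the Python A raises IndexError: a commit carrying a
-- truthy version list with fewer components than the first subsequent '!'-bump commit (before the
-- next version-carrying commit) reads. (After any bump the current version has 3 components again,
-- so only the first bump after each version-carrying commit can read out of range.)
def Pre_gittags (commits : List (String × Option (List Int) × Option String × String)) : Prop :=
  ∀ i, (h : i < commits.length) →
    pvVerTruthy commits[i].2.1 = true →
    ((((commits.drop (i + 1)).takeWhile (fun x => !pvVerTruthy x.2.1)).find?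
        (fun x => decide (pvBangs x.2.2.1 ≠ 0))).all
      (fun c => decide (4 - pvBangs c.2.2.1 ≤ (commits[i].2.1.getD []).length))) = true

instance (commits : List (String × Option (List Int) × Option String × String)) : Decidable (Pre_gittags commits) := by
  unfold Pre_gittags; infer_instance

def pvWitness_gittags : (List (String × Option (List Int) × Option String × String)) :=
  [("a1", some [1, 2, 3], none, "start"), ("b2", none, some "feat!!", "minor"), ("c3", none, some "fix!", "patch")]

def Spec_gittags (commits : List (String × Option (List Int) × Option String × String)) (out : List (String × List Int)) : Prop := out = gittags_alt commits
instance (commits : List (String × Option (List Int) × Option String × String)) (out : List (String × List Int)) : Decidable (Spec_gittags commits out) := by unfold Spec_gittags; infer_instance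

-- ===== CLAIM (what is proved, stated in full; the proofs are below) =====
def Claim_equal_gittags : Prop := ∀ (commits : List (String × Option (List Int) × Option String × String)), Dom_gittags commits → Pre_gittags commits → Spec_gittags commits (gittags commits)

-- ===== LEMMAS AND PROOFS =====

-- proof-only recursive form of Pre_: scan for the first bump after each version commit
def pvFirstBumpOK (len : Nat) : List (String × Option (List Int) × Option String × String) → Bool
  | [] => true
  | (_, ver, typ, _) :: rest =>
    if pvVerTruthy ver then true                                  -- a new version resets the state
    else if pvBangs typ = 0 then pvFirstBumpOK len rest           -- inert commit, keep scanning
    else decide (4 - pvBangs typ ≤ len)                           -- the first bump: needs len components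

def pvPreB : List (String × Option (List Int) × Option String × String) → Bool
  | [] => true
  | (_, ver, _, _) :: rest =>
    (match ver with
     | some l => if l.isEmpty then true else pvFirstBumpOK l.length rest
     | none => true) && pvPreB rest

-- the closed-form Pre_ implies the recursive scanner the induction below threads
theorem pre_shift (c : String × Option (List Int) × Option String × String)
    (rest : List (String × Option (List Int) × Option String × String))
    (h : Pre_gittags (c :: rest)) : Pre_gittags rest := by
  intro i hi hv
  have := h (i + 1) (by simpa using Nat.succ_lt_succ hi) (by simpa using hv)
  simpa using this

theorem fit_of_opt (len : Nat) (rest : List (String × Option (List Int) × Option String × String))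
    (h : (((rest.takeWhile (fun x => !pvVerTruthy x.2.1)).find?
        (fun x => decide (pvBangs x.2.2.1 ≠ 0))).all
      (fun c => decide (4 - pvBangs c.2.2.1 ≤ len))) = true) :
    pvFirstBumpOK len rest = true := by
  induction rest with
  | nil => rfl
  | cons x r ih =>
    obtain ⟨hsh, ver, typ, msg⟩ := x
    by_cases hv : pvVerTruthy ver = true
    · simp [pvFirstBumpOK, hv]
    · rw [Bool.not_eq_true] at hv
      rw [List.takeWhile_cons_of_pos (by simp [hv])] at h
      by_cases hb : pvBangs typ = 0
      · rw [List.find?_cons_of_neg (by simp [hb])] at h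
        simp [pvFirstBumpOK, hv, hb, ih h]
      · rw [List.find?_cons_of_pos (by simp [hb])] at h
        simp only [Option.all_some, decide_eq_true_eq] at h
        simp [pvFirstBumpOK, hv, hb]
        omega

theorem preB_of_pre (commits : List (String × Option (List Int) × Option String × String))
    (h : Pre_gittags commits) : pvPreB commits = true := by
  induction commits with
  | nil => rfl
  | cons c rest ih =>
    obtain ⟨hsh, ver, typ, msg⟩ := c
    have hrest := ih (pre_shift _ _ h)
    simp only [pvPreB, Bool.and_eq_true]
    refine ⟨?_, hrest⟩
    cases ver with
    | none => rfl
    | some l =>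
      by_cases hl : l.isEmpty
      · simp [hl]
      · have hv : pvVerTruthy (some l) = true := by
          simp [pvVerTruthy, hl]
        have h0 := h 0 (by simp) (by simpa using hv)
        simp only [List.getElem_cons_zero, List.drop_succ_cons, List.drop_zero,
          Option.getD_some] at h0
        simp [hl, fit_of_opt l.length rest h0]

-- a run of m '!' is a prefix of r iff the leading '!'-run of r has length ≥ m
theorem repl_prefix_iff (m : Nat) (r : List Char) :
    List.replicate m '!' <+: r ↔ m ≤ (r.takeWhile (· == '!')).length := by
  induction m generalizing r with
  | zero => simp
  | succ m ih =>
    cases r with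
    | nil => simp [List.replicate_succ]
    | cons c r =>
      by_cases hc : c = '!'
      · subst hc
        simp [List.replicate_succ, ih]
      · simp [List.replicate_succ, hc]
        intro h; exact absurd h.symm hc

-- t.endswith('!'*m) counted on the reversed character list
theorem endswith_run (t p : String) (m : Nat) (hp : p.toList = List.replicate m '!') :
    PySem.Str.endswith t p = true ↔ m ≤ (t.toList.reverse.takeWhile (· == '!')).length := by
  rw [PySem.Str.endswith_eq, PySem.Chars.endswith_iff, ← repl_prefix_iff]
  constructor
  · intro h
    have h' : p.toList.reverse <+: t.toList.reverse := List.reverse_prefix.mpr h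
    rw [hp, List.reverse_replicate] at h'
    exact h'
  · intro h
    apply List.reverse_prefix.mp
    rw [hp, List.reverse_replicate]
    exact h

-- the capped trailing-bang count, in terms of the leading run of the reversed list
theorem bangs_eq (t : String) (h : t ≠ "") :
    pvBangs (some t) = min 3 ((t.toList.reverse.takeWhile (· == '!')).length) := by
  have hlen : (pvRstripBang t).length = (t.toList.reverse.dropWhile (· == '!')).length := by
    simp [pvRstripBang]
  have hsplit : (t.toList.reverse.takeWhile (· == '!')).length + (t.toList.reverse.dropWhile (· == '!')).length = t.toList.length := by
    have h2 := congrArg List.length (List.takeWhile_append_dropWhile (p := (· == '!')) (l := t.toList.reverse))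
    rw [List.length_append, List.length_reverse] at h2
    exact h2
  simp only [pvBangs, if_neg h, hlen]
  omega

-- xs[i] for the small nonnegative literal indices the ports use
theorem pyGet?_zero' (xs : List Int) : PySem.List.pyGet? xs 0 = xs[0]? := by
  simpa using PySem.List.pyGet?_natCast xs 0
theorem pyGet?_one (xs : List Int) : PySem.List.pyGet? xs 1 = xs[1]? := by
  simpa using PySem.List.pyGet?_natCast xs 1
theorem pyGet?_two (xs : List Int) : PySem.List.pyGet? xs 2 = xs[2]? := by
  simpa using PySem.List.pyGet?_natCast xs 2

-- A's cascade, re-expressed through the capped trailing-bang count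
theorem bumpA_eq (cur : List Int) (t : String) (h : t ≠ "") :
    pvBumpA cur t =
      if pvBangs (some t) = 0 then none
      else some (match PySem.List.pyGet? cur ((3 - pvBangs (some t) : Nat) : Int) with
                 | none => none
                 | some x => some (cur.take (3 - pvBangs (some t)) ++ [x + 1] ++
                               List.replicate (2 - (3 - pvBangs (some t))) 0)) := by
  have hb := bangs_eq t h
  have edec : ∀ (p : String) (m : Nat), p.toList = List.replicate m '!' →
      PySem.Str.endswith t p = decide (m ≤ (t.toList.reverse.takeWhile (· == '!')).length) := by
    intro p m hp
    by_cases h' : m ≤ (t.toList.reverse.takeWhile (· == '!')).length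
    · rw [(endswith_run t p m hp).mpr h', decide_eq_true h']
    · have hne : ¬ PySem.Str.endswith t p = true := fun hc => h' ((endswith_run t p m hp).mp hc)
      rw [Bool.not_eq_true] at hne
      rw [hne, decide_eq_false h']
  set k := (t.toList.reverse.takeWhile (· == '!')).length with hk
  have e3 : PySem.Str.endswith t "!!!" = decide (3 ≤ k) := edec "!!!" 3 (by decide)
  have e2 : PySem.Str.endswith t "!!" = decide (2 ≤ k) := edec "!!" 2 (by decide)
  have e1 : PySem.Str.endswith t "!" = decide (1 ≤ k) := edec "!" 1 (by decide)
  rcases Nat.lt_or_ge k 1 with h1 | h1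
  · have hn : pvBangs (some t) = 0 := by rw [hb]; omega
    have b3 : PySem.Chars.endswith t.toList ['!', '!', '!'] = false := by
      simpa [show ¬ (3 ≤ k) by omega] using e3
    have b2 : PySem.Chars.endswith t.toList ['!', '!'] = false := by
      simpa [show ¬ (2 ≤ k) by omega] using e2
    have b1 : PySem.Chars.endswith t.toList ['!'] = false := by
      simpa [show ¬ (1 ≤ k) by omega] using e1
    simp [pvBumpA, b1, b2, b3, hn]
  · rcases Nat.lt_or_ge k 2 with h2 | h2
    · have hn : pvBangs (some t) = 1 := by rw [hb]; omega
      have b3 : PySem.Chars.endswith t.toList ['!', '!', '!'] = false := by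
        simpa [show ¬ (3 ≤ k) by omega] using e3
      have b2 : PySem.Chars.endswith t.toList ['!', '!'] = false := by
        simpa [show ¬ (2 ≤ k) by omega] using e2
      have b1 : PySem.Chars.endswith t.toList ['!'] = true := by
        simpa [h1] using e1
      rcases cur with _ | ⟨a, _ | ⟨b, _ | ⟨c, l⟩⟩⟩ <;>
        simp [pvBumpA, b1, b2, b3, hn, pyGet?_zero', pyGet?_one, pyGet?_two]
    · rcases Nat.lt_or_ge k 3 with h3 | h3
      · have hn : pvBangs (some t) = 2 := by rw [hb]; omega
        have b3 : PySem.Chars.endswith t.toList ['!', '!', '!'] = false := by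
          simpa [show ¬ (3 ≤ k) by omega] using e3
        have b2 : PySem.Chars.endswith t.toList ['!', '!'] = true := by
          simpa [h2] using e2
        rcases cur with _ | ⟨a, _ | ⟨b, l⟩⟩ <;>
          simp [pvBumpA, b2, b3, hn, pyGet?_zero', pyGet?_one]
      · have hn : pvBangs (some t) = 3 := by rw [hb]; omega
        have b3 : PySem.Chars.endswith t.toList ['!', '!', '!'] = true := by
          simpa [h3] using e3
        rcases cur with _ | ⟨a, l⟩ <;>
          simp [pvBumpA, b3, hn, pyGet?_zero']

-- endswith('!') decides whether the bump count is nonzero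
theorem endswith_one_iff (t : String) (h : t ≠ "") :
    PySem.Str.endswith t "!" = true ↔ pvBangs (some t) ≠ 0 := by
  rw [endswith_run t "!" 1 (by decide), bangs_eq t h]
  omega

-- the level stored by stage 1 is 3 - pvBangs, as an Int
theorem level_eq (t : String) (h : t ≠ "") :
    3 - min 3 ((t.toList.length : Int) - ((pvRstripBang t).length : Int))
      = ((3 - pvBangs (some t) : Nat) : Int) := by
  have hle : (pvRstripBang t).length ≤ t.toList.length := by
    have := List.length_dropWhile_le (p := (· == '!')) (l := t.toList.reverse)
    simpa [pvRstripBang] using this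
  simp only [pvBangs, if_neg h]
  omega

-- enumerate of a snoc
theorem enum_snoc {α : Type} (l : List α) (e : α) :
    PySem.List.enumerate (l ++ [e]) 0
      = PySem.List.enumerate l 0 ++ [((l.length : Int), e)] := by
  rw [PySem.List.enumerate_append]
  simp [PySem.List.enumerate_cons, PySem.List.enumerate_nil]

-- the closed-form component: base case and the two snoc cases
theorem pvComp_nil (base : List Int) (c : Int) :
    pvComp base [] c = PySem.List.pyGetD base c 0 := by
  simp [pvComp, PySem.List.enumerate]

theorem pvComp_snoc_reset (base hist : List Int) (lv c : Int) (h : lv < c) :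
    pvComp base (hist ++ [lv]) c = 0 := by
  have hf : List.filter (fun p => decide (p.2 < c)) [((hist.length : Int), lv)]
      = [((hist.length : Int), lv)] := by simp [h]
  simp only [pvComp, enum_snoc, List.filter_append, hf, List.map_append, List.map_cons,
    List.map_nil, List.getLast?_concat]
  have hs : PySem.List.slice (hist ++ [lv]) (some ((hist.length : Int) + 1)) none
      = (hist ++ [lv]).drop (hist.length + 1) := by
    rw [show ((hist.length : Int) + 1) = ((hist.length + 1 : Nat) : Int) by push_cast; ring,
      PySem.List.slice_from_natCast]
  simp [hs]

theorem pvComp_snoc_keep (base hist : List Int) (lv c : Int) (h : ¬ lv < c) :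
    pvComp base (hist ++ [lv]) c = pvComp base hist c + (if lv = c then 1 else 0) := by
  have hf : List.filter (fun p => decide (p.2 < c)) [((hist.length : Int), lv)] = [] := by
    simp [h]
  have hcnt : ∀ l : List Int, (l ++ [lv]).count c = l.count c + (if lv = c then 1 else 0) := by
    intro l
    by_cases hc : lv = c <;> simp [List.count_append, hc]
  simp only [pvComp, enum_snoc, List.filter_append, hf, List.append_nil]
  cases hlast : (((PySem.List.enumerate hist 0).filter (fun p => decide (p.2 < c))).map Prod.fst).getLast? with
  | none =>
    simp only []
    rw [hcnt hist]
    push_cast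
    ring
  | some j =>
    have hj : j ∈ ((PySem.List.enumerate hist 0).filter (fun p => decide (p.2 < c))).map Prod.fst :=
      List.mem_of_getLast? hlast
    simp only [List.mem_map, List.mem_filter] at hj
    obtain ⟨p, ⟨hp, _⟩, hpj⟩ := hj
    rw [PySem.List.mem_enumerate_iff] at hp
    obtain ⟨k, hk, hpk⟩ := hp
    have hjk : j = (k : Int) := by rw [← hpj, hpk]; simp
    have hdrop : ∀ l : List Int, PySem.List.slice l (some (j + 1)) none = l.drop (k + 1) := by
      intro l
      rw [hjk, show ((k : Int) + 1) = ((k + 1 : Nat) : Int) by push_cast; ring,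
        PySem.List.slice_from_natCast]
    simp only []
    rw [hdrop (hist ++ [lv]), hdrop hist, List.drop_append_of_le_length (by omega), hcnt]
    push_cast
    ring

-- the 3-component version vector of the closed form
def pvCompVec (base : List Int) (hist : List Int) : List Int :=
  [pvComp base hist 0, pvComp base hist 1, pvComp base hist 2]

theorem pyRange3_map (f : Int → Int) :
    (PySem.List.pyRange 0 3 1).map f = [f 0, f 1, f 2] := by
  have : PySem.List.pyRange 0 3 1 = [0, 1, 2] := by decide
  rw [this]; rfl

-- the reference emitter both ports are reduced to: carries the base and the bump levels so far
def refGo (base : List Int) (hist : List Int) :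
    List (String × Option (List Int) × Option String × String) → List (String × List Int)
  | [] => []
  | (hsh, ver, typ, _msg) :: rest =>
    if pvVerTruthy ver then refGo (ver.getD base) [] rest
    else
      match typ with
      | none => refGo base hist rest
      | some t =>
        if t ≠ "" ∧ PySem.Str.endswith t "!" = true then
          (hsh, pvCompVec base (hist ++ [((3 - pvBangs (some t) : Nat) : Int)])) ::
            refGo base (hist ++ [((3 - pvBangs (some t) : Nat) : Int)]) rest
        else refGo base hist rest

-- appending one bump to a segment appends exactly one tag
theorem segTags_snoc (base : List Int) (bs : List (String × Int)) (hsh : String) (lv : Int) :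
    pvSegTags base (bs ++ [(hsh, lv)]) =
      pvSegTags base bs ++ [(hsh, pvCompVec base (bs.map (·.2) ++ [lv]))] := by
  unfold pvSegTags
  rw [enum_snoc, List.map_append]
  congr 1
  · apply List.map_congr_left
    intro p hp
    rw [PySem.List.mem_enumerate_iff] at hp
    obtain ⟨k, hk, hpk⟩ := hp
    have h1 : p.1 = (k : Int) := by rw [hpk]; simp
    have hs : PySem.List.slice ((bs ++ [(hsh, lv)]).map (·.2)) none (some (p.1 + 1))
        = PySem.List.slice (bs.map (·.2)) none (some (p.1 + 1)) := by
      rw [h1, show ((k : Int) + 1) = ((k + 1 : Nat) : Int) by push_cast; ring,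
        PySem.List.slice_to_natCast, PySem.List.slice_to_natCast, List.map_append,
        List.take_append_of_le_length (by simpa using Nat.succ_le_of_lt hk)]
    simp only [hs]
  · simp only [List.map_cons, List.map_nil, List.map_append]
    rw [show ((bs.length : Int) + 1) = ((bs.length + 1 : Nat) : Int) by push_cast; ring,
      PySem.List.slice_to_natCast]
    rw [List.take_of_length_le (by simp)]
    simp [pyRange3_map, pvCompVec]

theorem segTags_nil (base : List Int) : pvSegTags base [] = [] := by
  simp [pvSegTags, PySem.List.enumerate]

-- getting component L of the closed-form vector
theorem compVec_get (base hist : List Int) (L : Nat) (hL : L ≤ 2) :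
    PySem.List.pyGet? (pvCompVec base hist) ((L : Nat) : Int)
      = some (pvComp base hist ((L : Nat) : Int)) := by
  rw [PySem.List.pyGet?_natCast]
  interval_cases L <;> simp [pvCompVec]

-- one bump applied to the running version, the closed form: from a raw base (the first bump)
theorem step_base (base : List Int) (L : Nat) (hL : L ≤ 2) (h : L + 1 ≤ base.length) :
    base.take L ++ [base.getD L 0 + 1] ++ List.replicate (2 - L) 0
      = pvCompVec base ([] ++ [((L : Nat) : Int)]) := by
  interval_cases L
  · rcases base with _ | ⟨b0, bs⟩
    · simp at h
    · have k0 := pvComp_snoc_keep (b0 :: bs) [] 0 0 (by norm_num)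
      have r1 := pvComp_snoc_reset (b0 :: bs) [] 0 1 (by norm_num)
      have r2 := pvComp_snoc_reset (b0 :: bs) [] 0 2 (by norm_num)
      simp only [List.nil_append] at k0 r1 r2
      simp [pvCompVec, k0, r1, r2, pvComp_nil, PySem.List.pyGetD]
  · rcases base with _ | ⟨b0, _ | ⟨b1, bs⟩⟩
    · simp at h
    · simp at h
    · have k0 := pvComp_snoc_keep (b0 :: b1 :: bs) [] 1 0 (by norm_num)
      have k1 := pvComp_snoc_keep (b0 :: b1 :: bs) [] 1 1 (by norm_num)
      have r2 := pvComp_snoc_reset (b0 :: b1 :: bs) [] 1 2 (by norm_num)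
      simp only [List.nil_append] at k0 k1 r2
      simp [pvCompVec, k0, k1, r2, pvComp_nil, PySem.List.pyGetD]
  · rcases base with _ | ⟨b0, _ | ⟨b1, _ | ⟨b2, bs⟩⟩⟩
    · simp at h
    · simp at h
    · simp at h
    · have k0 := pvComp_snoc_keep (b0 :: b1 :: b2 :: bs) [] 2 0 (by norm_num)
      have k1 := pvComp_snoc_keep (b0 :: b1 :: b2 :: bs) [] 2 1 (by norm_num)
      have k2 := pvComp_snoc_keep (b0 :: b1 :: b2 :: bs) [] 2 2 (by norm_num)
      simp only [List.nil_append] at k0 k1 k2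
      simp [pvCompVec, k0, k1, k2, pvComp_nil, PySem.List.pyGetD, pyGet?_one, pyGet?_two]

-- one bump applied to the running version, the closed form: from a closed-form vector
theorem step_ind (base hist : List Int) (L : Nat) (hL : L ≤ 2) :
    (pvCompVec base hist).take L ++ [pvComp base hist ((L : Nat) : Int) + 1] ++ List.replicate (2 - L) 0
      = pvCompVec base (hist ++ [((L : Nat) : Int)]) := by
  interval_cases L
  · have k0 := pvComp_snoc_keep base hist 0 0 (by norm_num)
    have r1 := pvComp_snoc_reset base hist 0 1 (by norm_num)
    have r2 := pvComp_snoc_reset base hist 0 2 (by norm_num)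
    simp [pvCompVec, k0, r1, r2]
  · have k0 := pvComp_snoc_keep base hist 1 0 (by norm_num)
    have k1 := pvComp_snoc_keep base hist 1 1 (by norm_num)
    have r2 := pvComp_snoc_reset base hist 1 2 (by norm_num)
    simp [pvCompVec, k0, k1, r2]
  · have k0 := pvComp_snoc_keep base hist 2 0 (by norm_num)
    have k1 := pvComp_snoc_keep base hist 2 1 (by norm_num)
    have k2 := pvComp_snoc_keep base hist 2 2 (by norm_num)
    simp [pvCompVec, k0, k1, k2]

-- B's staged pipeline equals the reference emitter
theorem segs_flatten (cs : List (String × Option (List Int) × Option String × String)) :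
    ∀ (base : List Int) (bumps : List (String × Int)),
    ((pvSegsGo base bumps cs).map (fun s => pvSegTags s.1 s.2)).flatten
      = pvSegTags base bumps ++ refGo base (bumps.map (·.2)) cs := by
  induction cs with
  | nil => intro base bumps; simp [pvSegsGo, refGo]
  | cons c rest ih =>
    obtain ⟨hsh, ver, typ, msg⟩ := c
    intro base bumps
    by_cases hv : pvVerTruthy ver = true
    · simp only [pvSegsGo, refGo, hv, if_true, List.map_cons, List.flatten_cons]
      rw [ih (ver.getD base) [], segTags_nil]
      simp
    · rw [Bool.not_eq_true] at hv
      cases typ with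
      | none =>
        simp only [pvSegsGo, refGo, hv, Bool.false_eq_true, if_false]
        exact ih base bumps
      | some t =>
        by_cases hc : t ≠ "" ∧ PySem.Str.endswith t "!" = true
        · simp only [pvSegsGo, refGo, hv, Bool.false_eq_true, if_false, if_pos hc]
          rw [ih base _, segTags_snoc, level_eq t hc.1]
          simp [List.map_append]
        · simp only [pvSegsGo, refGo, hv, Bool.false_eq_true, if_false, if_neg hc]
          exact ih base bumps

-- A's threaded loop equals the reference emitter (under Pre_)
theorem goA_eq_ref (cs : List (String × Option (List Int) × Option String × String)) :
    ∀ (base hist cur : List Int) (tags : List (String × List Int)),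
    pvPreB cs = true →
    ((hist = [] ∧ cur = base ∧ pvFirstBumpOK base.length cs = true) ∨
     (hist ≠ [] ∧ cur = pvCompVec base hist)) →
    gittagsGoA cur tags cs = tags ++ refGo base hist cs := by
  induction cs with
  | nil => intro base hist cur tags _ _; simp [gittagsGoA, refGo]
  | cons c rest ih =>
    obtain ⟨hsh, ver, typ, msg⟩ := c
    intro base hist cur tags hpre hinv
    have hpre' : pvPreB rest = true := by
      have h := hpre; simp only [pvPreB, Bool.and_eq_true] at h; exact h.2
    by_cases hv : pvVerTruthy ver = true
    · obtain ⟨l, rfl⟩ : ∃ l, ver = some l := by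
        cases ver with
        | none => simp [pvVerTruthy] at hv
        | some l => exact ⟨l, rfl⟩
      have hlne : l.isEmpty = false := by
        have h := hv; simp only [pvVerTruthy, Bool.not_eq_eq_eq_not, Bool.not_true] at h
        simpa using h
      have hfit : pvFirstBumpOK l.length rest = true := by
        have h := hpre
        simp only [pvPreB, Bool.and_eq_true, hlne, Bool.ite_eq_true_distrib] at h
        simpa [hlne] using h.1
      simp only [gittagsGoA, refGo, hv, if_true, Option.getD_some]
      exact ih l [] l tags hpre' (Or.inl ⟨rfl, rfl, hfit⟩)
    · rw [Bool.not_eq_true] at hv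
      cases typ with
      | none =>
        simp only [gittagsGoA, refGo, hv, Bool.false_eq_true, if_false]
        apply ih base hist cur tags hpre'
        rcases hinv with ⟨h1, h2, h3⟩ | hr
        · exact Or.inl ⟨h1, h2, by simpa [pvFirstBumpOK, hv, pvBangs] using h3⟩
        · exact Or.inr hr
      | some t =>
        by_cases ht : t = ""
        · subst ht
          have hc : ¬ (("" : String) ≠ "" ∧ PySem.Str.endswith "" "!" = true) := by simp
          simp only [gittagsGoA, refGo, hv, Bool.false_eq_true, if_false, if_neg hc]
          apply ih base hist cur tags hpre'
          rcases hinv with ⟨h1, h2, h3⟩ | hr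
          · exact Or.inl ⟨h1, h2, by simpa [pvFirstBumpOK, hv, pvBangs] using h3⟩
          · exact Or.inr hr
        · by_cases hb : pvBangs (some t) = 0
          · have hend : PySem.Str.endswith t "!" = false := by
              rw [Bool.eq_false_iff]
              intro hx
              exact ((endswith_one_iff t ht).mp hx) hb
            have hc : ¬ (t ≠ "" ∧ PySem.Str.endswith t "!" = true) := fun h => by
              rw [hend] at h; exact Bool.false_ne_true h.2
            simp only [gittagsGoA, refGo, hv, Bool.false_eq_true, if_false, if_neg ht,
              bumpA_eq cur t ht, if_pos hb, if_neg hc]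
            apply ih base hist cur tags hpre'
            rcases hinv with ⟨h1, h2, h3⟩ | hr
            · exact Or.inl ⟨h1, h2, by simpa [pvFirstBumpOK, hv, hb] using h3⟩
            · exact Or.inr hr
          · have hend : PySem.Str.endswith t "!" = true := (endswith_one_iff t ht).mpr hb
            have hc : t ≠ "" ∧ PySem.Str.endswith t "!" = true := ⟨ht, hend⟩
            have hm1 : 1 ≤ pvBangs (some t) := Nat.one_le_iff_ne_zero.mpr hb
            have hm3 : pvBangs (some t) ≤ 3 := by
              simp only [pvBangs, if_neg ht]
              exact Nat.min_le_left 3 _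
            have hL : 3 - pvBangs (some t) ≤ 2 := by omega
            rcases hinv with ⟨hh, hcur, hfit⟩ | ⟨hh, hcur⟩
            · subst hh hcur
              have hlen : 3 - pvBangs (some t) + 1 ≤ cur.length := by
                have h := hfit
                simp only [pvFirstBumpOK, hv, Bool.false_eq_true, if_false, hb,
                  decide_eq_true_eq] at h
                omega
              have hget : PySem.List.pyGet? cur ((3 - pvBangs (some t) : Nat) : Int)
                  = some (cur.getD (3 - pvBangs (some t)) 0) := by
                rw [PySem.List.pyGet?_natCast, List.getElem?_eq_getElem (by omega),
                  List.getD_eq_getElem _ _ (by omega)]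
              simp only [gittagsGoA, refGo, hv, Bool.false_eq_true, if_false, if_neg ht,
                bumpA_eq cur t ht, if_neg hb, hget, if_pos hc]
              rw [step_base cur (3 - pvBangs (some t)) hL hlen]
              rw [ih cur ([] ++ [((3 - pvBangs (some t) : Nat) : Int)]) _ _ hpre'
                (Or.inr ⟨by simp, rfl⟩)]
              simp
            · subst hcur
              simp only [gittagsGoA, refGo, hv, Bool.false_eq_true, if_false, if_neg ht,
                bumpA_eq (pvCompVec base hist) t ht, if_neg hb,
                compVec_get base hist (3 - pvBangs (some t)) hL, if_pos hc]
              rw [step_ind base hist (3 - pvBangs (some t)) hL]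
              rw [ih base (hist ++ [((3 - pvBangs (some t) : Nat) : Int)]) _ _ hpre'
                (Or.inr ⟨by simp, rfl⟩)]
              simp
theorem firstBumpOK_three (cs : List (String × Option (List Int) × Option String × String)) :
    pvFirstBumpOK 3 cs = true := by
  induction cs with
  | nil => rfl
  | cons c rest ih =>
    obtain ⟨hsh, ver, typ, msg⟩ := c
    by_cases hv : pvVerTruthy ver = true
    · simp [pvFirstBumpOK, hv]
    · rw [Bool.not_eq_true] at hv
      by_cases hb : pvBangs typ = 0
      · simp [pvFirstBumpOK, hv, hb, ih]
      · simp [pvFirstBumpOK, hv, hb]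
        omega

-- ===== VERDICT (by name: the statement is the Claim_ definition above) =====
theorem gittags_spec : Claim_equal_gittags := by
  intro commits _ hpre0
  have hpre : pvPreB commits = true := preB_of_pre commits hpre0
  unfold Spec_gittags gittags gittags_alt
  rw [segs_flatten, segTags_nil, List.nil_append]
  exact goA_eq_ref commits [0, 0, 0] [] [0, 0, 0] [] hpre
    (Or.inl ⟨rfl, rfl, firstBumpOK_three commits⟩)
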